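-- pv_equiv track=rewrite | github.com/sushanthc00/LeetCodeRuns | LeetCodeSolves/FindSafestPathInGrid_2812_Djikstra.py | safest_path
-- ===== SOURCE A (Python) =====
-- from collections import deque
-- import heapq
--
-- def bfs(grid, n):
--     dist = [[float('inf')] * n for _ in range(n)]
--     q = deque()
--
--     for r in range(n):
--         for c in range(n):
--             if grid[r][c] == 1:
--                 dist[r][c] = 0
--                 q.append((r, c))
--
--     directions = [(0, 1), (0, -1), (1, 0), (-1, 0)]
--
--     while q:
--         r, c = q.popleft()
--         for dr, dc in directions:
--             nr, nc = r + dr, c + dc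
--             if 0 <= nr < n and 0 <= nc < n and dist[nr][nc] == float('inf'):
--                 dist[nr][nc] = dist[r][c] + 1
--                 q.append((nr, nc))
--     return dist
--
-- def safest_path(grid):
--     n = len(grid)
--     dist = bfs(grid, n)
--
--     pq = [(-dist[0][0], 0, 0)]
--     visited = [[False] * n for _ in range(n)]
--     visited[0][0] = True
--
--     directions = [(0, 1), (0, -1), (1, 0), (-1, 0)]
--
--     while pq:
--         safeness, r, c = heapq.heappop(pq)
--         safeness = - safeness
--
--         if r == n - 1 and c == n - 1:
--             return safeness
--
--         for dr, dc in directions: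
--             nr, nc = r + dr, c + dc
--             if 0 <= nr < n and 0 <= nc < n and not visited[nr][nc]:
--                 visited[nr][nc] = True
--                 heapq.heappush(pq, (-min(safeness, dist[nc][nr]), nr, nc))
--
--     return 0
-- ===== SOURCE B (Python) =====
-- from collections import deque
--
--
-- def bfs(grid, n):
--     dist = [[float('inf')] * n for _ in range(n)]
--     q = deque()
--
--     for r in range(n):
--         for c in range(n):
--             if grid[r][c] == 1:
--                 dist[r][c] = 0
--                 q.append((r, c))
--
--     directions = [(0, 1), (0, -1), (1, 0), (-1, 0)]
--
--     while q:
--         r, c = q.popleft()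
--         for dr, dc in directions:
--             nr, nc = r + dr, c + dc
--             if 0 <= nr < n and 0 <= nc < n and dist[nr][nc] == float('inf'):
--                 dist[nr][nc] = dist[r][c] + 1
--                 q.append((nr, nc))
--     return dist
--
--
-- def _connected(dist, n, t):
--     # flood fill over the cells whose distance-to-a-thief is at least t
--     if dist[0][0] < t:
--         return False
--     seen = {(0, 0)}
--     stack = [(0, 0)]
--     while stack:
--         r, c = stack.pop()
--         for dr, dc in ((0, 1), (0, -1), (1, 0), (-1, 0)):
--             nr, nc = r + dr, c + dc
--             if 0 <= nr < n and 0 <= nc < n and (nr, nc) not in seen and dist[nr][nc] >= t: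
--                 seen.add((nr, nc))
--                 stack.append((nr, nc))
--     return (n - 1, n - 1) in seen
--
--
-- def safest_path(grid):
--     n = len(grid)
--     dist = bfs(grid, n)
--     # try every candidate safeness threshold from best down; the first one at which
--     # the two corners are connected is the answer
--     for t in sorted({dist[r][c] for r in range(n) for c in range(n)}, reverse=True):
--         if _connected(dist, n, t):
--             return t
--     return 0
-- ===== Notes on version B (the rewrite author's own statement) =====
-- stated objective: alternative
-- what changed: The heap-based max-min Dijkstra over the BFS distance field is replaced by a threshold search: collect the distinct distance values, try them in descending order, and return the first threshold at which a plain stack flood-fill over cells with distance >= threshold connects (0,0) to (n-1,n-1); Pre_ excludes the empty grid and grids with a row shorter than len(grid) (both raise IndexError) and grids with no 1 in the top-left n-by-n square (A returns the float inf, not an int).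
-- outside the precondition, e.g. on safest_path([[0]]): A returns inf, B returns inf; on safest_path([[1, 1], [1]]): A raises IndexError, B raises IndexError
import Mathlib
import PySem

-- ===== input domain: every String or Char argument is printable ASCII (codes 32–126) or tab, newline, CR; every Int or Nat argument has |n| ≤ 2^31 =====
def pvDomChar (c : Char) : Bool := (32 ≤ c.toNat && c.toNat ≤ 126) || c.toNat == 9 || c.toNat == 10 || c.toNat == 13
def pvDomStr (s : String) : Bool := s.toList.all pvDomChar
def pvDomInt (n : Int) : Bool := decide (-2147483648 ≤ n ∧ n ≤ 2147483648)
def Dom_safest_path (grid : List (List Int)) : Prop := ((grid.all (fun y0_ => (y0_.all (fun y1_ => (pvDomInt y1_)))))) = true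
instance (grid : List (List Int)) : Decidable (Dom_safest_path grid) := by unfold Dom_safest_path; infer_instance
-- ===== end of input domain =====

-- B replaces A's heap-based max-min Dijkstra by a descending threshold search with a
-- stack flood-fill (objective: alternative algorithm, similar cost).
-- Python's float('inf') distances are modelled as `none : Option Int` (none = +infinity);
-- under Pre_ every distance that reaches the returned value is a finite int, so the
-- `.getD 0` readback at the single return site is exact there.

-- ===== PORT A =====
-- `KO` is the type of a distance value: `none` is Python's float('inf').
abbrev KO := Option Int
-- kLe a b  =  Python `a <= b` on distances, with none = +inf
def kLe : KO → KO → Bool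
  | _, none => true
  | none, some _ => false
  | some a, some b => decide (a ≤ b)
-- Python min(a, b) (first argument on ties)
def kMin (a b : KO) : KO := if kLe a b then a else b
-- grid[r][c]; the default 0 is never read under Pre_ (rows long enough, indices in range)
def gAt (grid : List (List Int)) (r c : Int) : Int :=
  PySem.List.pyGetD (PySem.List.pyGetD grid r []) c 0
-- dist[r][c]; default none(=inf) never read under the in-range guards below
def mAt (d : List (List KO)) (r c : Int) : KO :=
  PySem.List.pyGetD (PySem.List.pyGetD d r []) c none
-- dist[c][r]: the transposed read A's Dijkstra performs (dist[nc][nr] in the Python)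
def vAt (d : List (List KO)) (r c : Int) : KO := mAt d c r
-- dist[r][c] = x (in-range matrix update)
def setM (d : List (List KO)) (r c : Int) (x : KO) : List (List KO) :=
  d.set r.toNat ((d.getD r.toNat []).set c.toNat x)
def dirs : List (Int × Int) := [(0,1),(0,-1),(1,0),(-1,0)]
-- row-major list of the n*n cells, = the double loop `for r in range(n): for c in range(n)`
def cells (n : Int) : List (Int × Int) :=
  (List.range n.toNat).flatMap (fun r => (List.range n.toNat).map (fun c => ((r : Int), (c : Int))))

-- BFS queue loop (deque: pop at the front, append at the back).  Fuel only makes the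
-- recursion structural: every enqueue turns a `none` cell `some`, so on the matrices this
-- is actually run on there are at most n*n enqueues and the fuel n*n+1 is never exhausted.
def bfsLoop (n : Int) : Nat → List (Int × Int) → List (List KO) → List (List KO)
  | 0, _, d => d
  | _ + 1, [], d => d
  | f + 1, (r, c) :: q, d =>
      let st := dirs.foldl (fun (st : List (List KO) × List (Int × Int)) dd =>
        let nr := r + dd.1
        let nc := c + dd.2
        if 0 ≤ nr ∧ nr < n ∧ 0 ≤ nc ∧ nc < n ∧ mAt st.1 nr nc = none then
          (setM st.1 nr nc ((mAt st.1 r c).map (· + 1)), st.2 ++ [(nr, nc)])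
        else st) (d, q)
      bfsLoop n f st.2 st.1

-- port of A's bfs(grid, n) (B's Python keeps this helper verbatim, so both ports share it)
def bfsGrid (grid : List (List Int)) (n : Int) : List (List KO) :=
  let d0 := List.replicate n.toNat (List.replicate n.toNat (none : KO))
  let st := (cells n).foldl
    (fun (st : List (List KO) × List (Int × Int)) p =>
      if gAt grid p.1 p.2 = 1 then (setM st.1 p.1 p.2 (some 0), st.2 ++ [p]) else st)
    (d0, ([] : List (Int × Int)))
  bfsLoop n (n.toNat * n.toNat + 1) st.2 st.1

-- heap entries (safeness, r, c); heapq orders by (-safeness, r, c)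
abbrev EK := KO × Int × Int
def eLe (a b : EK) : Bool :=
  if a.1 = b.1 then
    (if a.2.1 = b.2.1 then decide (a.2.2 ≤ b.2.2) else decide (a.2.1 < b.2.1))
  else !(kLe a.1 b.1)
-- heapq.heappop: remove and return the least entry under eLe
def popMin : List EK → Option (EK × List EK)
  | [] => none
  | [e] => some (e, [])
  | e :: rest =>
      match popMin rest with
      | none => some (e, [])
      | some (m, r') => if eLe e m then some (e, rest) else some (m, e :: r')

-- one direction step of A's neighbour loop: push (min(safeness, dist[nc][nr]), nr, nc), mark visited
def relaxA (n : Int) (dist : List (List KO)) (s : KO) (r c : Int)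
    (st : List EK × List (Int × Int)) (d : Int × Int) : List EK × List (Int × Int) :=
  let nr := r + d.1
  let nc := c + d.2
  if 0 ≤ nr ∧ nr < n ∧ 0 ≤ nc ∧ nc < n ∧ (nr, nc) ∉ st.2 then
    (st.1 ++ [(kMin s (vAt dist nr nc), nr, nc)], PySem.Set.add st.2 (nr, nc))
  else st

-- number of not-yet-visited cells (termination measure bookkeeping)
def unvis (n : Int) (vis : List (Int × Int)) : Nat :=
  ((cells n).filter (fun x => !(decide (x ∈ vis)))).length

theorem mem_cells {n : Int} {p : Int × Int} :
    p ∈ cells n ↔ 0 ≤ p.1 ∧ p.1 < n ∧ 0 ≤ p.2 ∧ p.2 < n := by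
  obtain ⟨a, b⟩ := p
  constructor
  · intro h
    simp only [cells, List.mem_flatMap, List.mem_map] at h
    obtain ⟨r, hr, c, hc, heq⟩ := h
    simp only [Prod.mk.injEq] at heq
    obtain ⟨h1, h2⟩ := heq
    simp at hr hc
    obtain ⟨r', hr', rfl⟩ := hr
    obtain ⟨c', hc', rfl⟩ := hc
    refine ⟨by omega, by omega, by omega, by omega⟩
  · rintro ⟨h0, h1, h2, h3⟩
    unfold cells
    refine List.mem_flatMap.mpr ⟨a.toNat, ?_, ?_⟩
    · simp
      refine ⟨a.toNat, ?_, ?_⟩ <;> omega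
    refine List.mem_map.mpr ⟨b, ?_, ?_⟩
    · simp
      refine ⟨b.toNat, ?_, ?_⟩ <;> omega
    have e : ((a.toNat : Nat) : Int) = a := by omega
    rw [e]

theorem filt_mono (vis : List (Int × Int)) (x : Int × Int) (l : List (Int × Int)) :
    (l.filter (fun y => !decide (y ∈ vis ++ [x]))).length
      ≤ (l.filter (fun y => !decide (y ∈ vis))).length := by
  induction l with
  | nil => simp
  | cons a t ih =>
    by_cases h : a ∈ vis ++ [x]
    · rw [List.filter_cons_of_neg (by simp [h])]
      by_cases h2 : a ∈ vis
      · rw [List.filter_cons_of_neg (by simp [h2])]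
        exact ih
      · rw [List.filter_cons_of_pos (by simp [h2])]
        simp only [List.length_cons]
        omega
    · have h2 : a ∉ vis := fun hh => h (by simp [hh])
      rw [List.filter_cons_of_pos (by simp at h ⊢; tauto),
          List.filter_cons_of_pos (by simp [h2])]
      simp only [List.length_cons]
      omega

theorem filt_strict (vis : List (Int × Int)) (x : Int × Int) (l : List (Int × Int))
    (hx : x ∈ l) (hnx : x ∉ vis) :
    (l.filter (fun y => !decide (y ∈ vis ++ [x]))).length
      < (l.filter (fun y => !decide (y ∈ vis))).length := by
  induction l with
  | nil => simp at hx
  | cons a t ih =>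
    rcases List.mem_cons.mp hx with rfl | hxt
    · rw [List.filter_cons_of_neg (by simp), List.filter_cons_of_pos (by simp [hnx])]
      have := filt_mono vis x t
      simp only [List.length_cons]
      omega
    · have hlt := ih hxt
      by_cases h2 : a ∈ vis
      · rw [List.filter_cons_of_neg (by simp [h2]),
            List.filter_cons_of_neg (by simp [h2])]
        exact hlt
      · by_cases h : a ∈ vis ++ [x]
        · rw [List.filter_cons_of_neg (by simp [h]),
              List.filter_cons_of_pos (by simp [h2])]
          simp only [List.length_cons]
          omega
        · rw [List.filter_cons_of_pos (by simp at h ⊢; tauto),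
              List.filter_cons_of_pos (by simp [h2])]
          simp only [List.length_cons]
          omega

theorem unvis_add_lt (n : Int) (x : Int × Int) (vis : List (Int × Int))
    (hx : x ∈ cells n) (hnx : x ∉ vis) :
    unvis n (PySem.Set.add vis x) < unvis n vis := by
  have : PySem.Set.add vis x = vis ++ [x] := by simp [PySem.Set.add, hnx]
  rw [this]
  exact filt_strict vis x (cells n) hx hnx

-- termination helper lemmas for loopA (cited in decreasing_by)
theorem unvis_relax_le (n : Int) (dist : List (List KO)) (s : KO) (r c : Int)
    (ds : List (Int × Int)) (pq0 : List EK) (vis0 : List (Int × Int)) :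
    (ds.foldl (relaxA n dist s r c) (pq0, vis0)).1.length
        + unvis n (ds.foldl (relaxA n dist s r c) (pq0, vis0)).2
      ≤ pq0.length + unvis n vis0 := by
  induction ds generalizing pq0 vis0 with
  | nil => simp
  | cons d ds ih =>
    simp only [List.foldl_cons]
    rcases hrel : relaxA n dist s r c (pq0, vis0) d with ⟨pq1, vis1⟩
    have hle : pq1.length + unvis n vis1 ≤ pq0.length + unvis n vis0 := by
      unfold relaxA at hrel
      simp only at hrel
      split_ifs at hrel with hg
      · obtain ⟨h1, h2, h3, h4, h5⟩ := hg
        injection hrel with e1 e2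
        have hmem : ((r + d.1, c + d.2) : Int × Int) ∈ cells n := mem_cells.mpr ⟨h1, h2, h3, h4⟩
        have := unvis_add_lt n (r + d.1, c + d.2) vis0 hmem h5
        rw [← e1, ← e2]
        simp only [List.length_append, List.length_cons, List.length_nil]
        omega
      · injection hrel with e1 e2
        rw [← e1, ← e2]
    exact le_trans (ih pq1 vis1) hle

theorem popMin_isSome (a : EK) (t : List EK) : (popMin (a :: t)).isSome := by
  induction t generalizing a with
  | nil => rfl
  | cons b u ih =>
    have h := ih b
    rw [show popMin (a :: b :: u) =
      (match popMin (b :: u) with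
       | none => some (a, [])
       | some (m, r') => if eLe a m then some (a, b :: u) else some (m, a :: r')) from rfl]
    rcases hp : popMin (b :: u) with _ | ⟨m, r'⟩
    · simp
    · simp only
      split_ifs <;> simp

theorem popMin_length : ∀ {pq : List EK} {e : EK} {rest : List EK},
    popMin pq = some (e, rest) → rest.length + 1 = pq.length := by
  intro pq
  induction pq with
  | nil => intro e rest h; simp [popMin] at h
  | cons a t ih =>
    intro e rest h
    cases t with
    | nil =>
      simp [popMin] at h
      simp [h.2.symm]
    | cons b u =>
      rw [show popMin (a :: b :: u) =
        (match popMin (b :: u) with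
         | none => some (a, [])
         | some (m, r') => if eLe a m then some (a, b :: u) else some (m, a :: r')) from rfl] at h
      rcases hp : popMin (b :: u) with _ | ⟨m, r'⟩
      · have := popMin_isSome b u
        rw [hp] at this
        simp at this
      · rw [hp] at h
        dsimp only at h
        split_ifs at h with hle
        · injection h with hh
          have hr : rest = b :: u := (congrArg Prod.snd hh).symm
          subst hr
          rfl
        · injection h with hh
          have hr : rest = a :: r' := (congrArg Prod.snd hh).symm
          have := ih hp
          subst hr
          simp only [List.length_cons] at this ⊢
          omega

-- A's main Dijkstra loop (visited marked at push time, exactly as in the Python)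
def loopA (n : Int) (dist : List (List KO)) (pq : List EK) (vis : List (Int × Int)) : Int :=
  match h : popMin pq with
  | none => 0
  | some (e, rest) =>
      if e.2.1 = n - 1 ∧ e.2.2 = n - 1 then e.1.getD 0
      else
        let st := dirs.foldl (relaxA n dist e.1 e.2.1 e.2.2) (rest, vis)
        loopA n dist st.1 st.2
termination_by pq.length + unvis n vis
decreasing_by
  have h1 := unvis_relax_le n dist e.1 e.2.1 e.2.2 dirs rest vis
  have h2 := popMin_length h
  omega

def safest_path (grid : List (List Int)) : Int :=
  let n : Int := grid.length
  let dist := bfsGrid grid n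
  loopA n dist [(mAt dist 0 0, 0, 0)] (PySem.Set.ofList [((0 : Int), (0 : Int))])

-- ===== PORT B =====
-- insert into a descending-sorted list; sortDescK is sorted(…, reverse=True) on distances
def insDesc (x : KO) : List KO → List KO
  | [] => [x]
  | y :: t => if kLe x y then y :: insDesc x t else x :: y :: t
def sortDescK (l : List KO) : List KO := l.foldl (fun acc x => insDesc x acc) []
-- the set {dist[r][c] | r, c in range(n)} of distinct distance values
def valsB (n : Int) (dist : List (List KO)) : List KO :=
  PySem.Set.ofList ((cells n).map (fun p => mAt dist p.1 p.2))

-- one direction step of the flood fill: extend seen/stack by an in-range unseen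
-- neighbour whose distance value is >= t
def relaxF (n : Int) (dist : List (List KO)) (t : KO) (r c : Int)
    (st : List (Int × Int) × List (Int × Int)) (d : Int × Int) : List (Int × Int) × List (Int × Int) :=
  let nr := r + d.1
  let nc := c + d.2
  if 0 ≤ nr ∧ nr < n ∧ 0 ≤ nc ∧ nc < n ∧ (nr, nc) ∉ st.2 ∧ kLe t (mAt dist nr nc) = true then
    ((nr, nc) :: st.1, PySem.Set.add st.2 (nr, nc))
  else st

theorem unvis_relaxF_le (n : Int) (dist : List (List KO)) (t : KO) (r c : Int)
    (ds : List (Int × Int)) (pq0 : List (Int × Int)) (vis0 : List (Int × Int)) :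
    (ds.foldl (relaxF n dist t r c) (pq0, vis0)).1.length
        + unvis n (ds.foldl (relaxF n dist t r c) (pq0, vis0)).2
      ≤ pq0.length + unvis n vis0 := by
  induction ds generalizing pq0 vis0 with
  | nil => simp
  | cons d ds ih =>
    simp only [List.foldl_cons]
    rcases hrel : relaxF n dist t r c (pq0, vis0) d with ⟨pq1, vis1⟩
    have hle : pq1.length + unvis n vis1 ≤ pq0.length + unvis n vis0 := by
      unfold relaxF at hrel
      simp only at hrel
      split_ifs at hrel with hg
      · obtain ⟨h1, h2, h3, h4, h5, h6⟩ := hg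
        injection hrel with e1 e2
        have hmem : ((r + d.1, c + d.2) : Int × Int) ∈ cells n := mem_cells.mpr ⟨h1, h2, h3, h4⟩
        have := unvis_add_lt n (r + d.1, c + d.2) vis0 hmem h5
        rw [← e1, ← e2]
        simp only [List.length_cons]
        omega
      · injection hrel with e1 e2
        rw [← e1, ← e2]
    exact le_trans (ih pq1 vis1) hle

-- DFS flood fill (the Lean stack keeps its top at the head; push/pop at the same end as Python)
def floodLoop (n : Int) (dist : List (List KO)) (t : KO) :
    List (Int × Int) → List (Int × Int) → List (Int × Int)
  | [], seen => seen
  | (r, c) :: stack, seen =>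
      let st := dirs.foldl (relaxF n dist t r c) (stack, seen)
      floodLoop n dist t st.1 st.2
termination_by stack seen => stack.length + unvis n seen
decreasing_by
  have h1 := unvis_relaxF_le n dist t r c dirs stack seen
  have h2 : ((r, c) :: stack).length = stack.length + 1 := rfl
  omega

-- _connected(dist, n, t) of Source B
def connB (n : Int) (dist : List (List KO)) (t : KO) : Bool :=
  if kLe t (mAt dist 0 0) = true then
    decide ((n - 1, n - 1) ∈
      floodLoop n dist t [((0 : Int), (0 : Int))] (PySem.Set.ofList [((0 : Int), (0 : Int))]))
  else false

-- the for-loop of Source B: first threshold (descending) that connects the corners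
def searchLoop (n : Int) (dist : List (List KO)) : List KO → Int
  | [] => 0
  | t :: ts => if connB n dist t then t.getD 0 else searchLoop n dist ts

def safest_path_alt (grid : List (List Int)) : Int :=
  let n : Int := grid.length
  let dist := bfsGrid grid n
  searchLoop n dist (sortDescK (valsB n dist))

-- ===== PRECONDITION & SPEC =====
-- Pre_ excludes exactly the inputs on which the Python A does not return an int:
-- the empty grid and grids with a row shorter than len(grid) (IndexError), and grids
-- whose top-left len(grid)×len(grid) square contains no 1, on which the BFS distances
-- stay float('inf') and A returns the float inf.
def Pre_safest_path (grid : List (List Int)) : Prop :=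
  1 ≤ grid.length ∧ (∀ row ∈ grid, grid.length ≤ row.length) ∧
    (∃ row ∈ grid, ∃ x ∈ row.take grid.length, x = 1)
instance (grid : List (List Int)) : Decidable (Pre_safest_path grid) := by
  unfold Pre_safest_path; infer_instance

def pvWitness_safest_path : List (List Int) := [[1]]

def Spec_safest_path (grid : List (List Int)) (out : Int) : Prop := out = safest_path_alt grid
instance (grid : List (List Int)) (out : Int) : Decidable (Spec_safest_path grid out) := by
  unfold Spec_safest_path; infer_instance

-- ===== CLAIM (what is proved, stated in full; the proofs are below) =====
def Claim_equal_safest_path : Prop :=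
  ∀ (grid : List (List Int)), Dom_safest_path grid → Pre_safest_path grid →
    Spec_safest_path grid (safest_path grid)

-- ===== LEMMAS AND PROOFS =====

-- ---------- order toolkit for KO (none = +infinity) ----------
theorem kLe_refl (a : KO) : kLe a a = true := by cases a <;> simp [kLe]

theorem kLe_trans {a b c : KO} (h1 : kLe a b = true) (h2 : kLe b c = true) :
    kLe a c = true := by
  cases a <;> cases b <;> cases c <;> simp [kLe] at * <;> omega

theorem kLe_total (a b : KO) : kLe a b = true ∨ kLe b a = true := by
  cases a <;> cases b <;> simp [kLe] <;> omega

theorem kLe_antisymm {a b : KO} (h1 : kLe a b = true) (h2 : kLe b a = true) : a = b := by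
  cases a <;> cases b <;> simp [kLe] at * <;> omega

theorem kMin_le_left (a b : KO) : kLe (kMin a b) a = true := by
  unfold kMin; split_ifs with h
  · exact kLe_refl a
  · rcases kLe_total a b with h' | h'
    · exact absurd h' h
    · exact h'

theorem kMin_le_right (a b : KO) : kLe (kMin a b) b = true := by
  unfold kMin; split_ifs with h
  · exact h
  · exact kLe_refl b

theorem le_kMin {t a b : KO} (h1 : kLe t a = true) (h2 : kLe t b = true) :
    kLe t (kMin a b) = true := by
  unfold kMin; split_ifs <;> assumption

-- ---------- heap-order toolkit ----------
theorem eLe_key {a b : EK} (h : eLe a b = true) : kLe b.1 a.1 = true := by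
  unfold eLe at h
  by_cases h1 : a.1 = b.1
  · rw [h1]; exact kLe_refl b.1
  · rw [if_neg h1] at h
    simp only [Bool.not_eq_true'] at h
    rcases kLe_total a.1 b.1 with h' | h'
    · rw [h'] at h; cases h
    · exact h'

theorem eLe_refl (a : EK) : eLe a a = true := by
  unfold eLe; simp

theorem eLe_total (a b : EK) : eLe a b = true ∨ eLe b a = true := by
  unfold eLe
  by_cases h1 : a.1 = b.1
  · rw [if_pos h1, if_pos h1.symm]
    by_cases h2 : a.2.1 = b.2.1
    · rw [if_pos h2, if_pos h2.symm]
      simp; omega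
    · rw [if_neg h2, if_neg (Ne.symm h2)]
      simp; omega
  · rw [if_neg h1, if_neg (Ne.symm h1)]
    by_cases hk : kLe a.1 b.1 = true
    · right
      by_cases hk2 : kLe b.1 a.1 = true
      · exact absurd (kLe_antisymm hk hk2) h1
      · simpa using hk2
    · left
      simpa using hk

theorem eLe_trans {a b c : EK} (h1 : eLe a b = true) (h2 : eLe b c = true) :
    eLe a c = true := by
  unfold eLe at *
  by_cases hab : a.1 = b.1 <;> by_cases hbc : b.1 = c.1
  · rw [if_pos hab] at h1
    rw [if_pos hbc] at h2
    rw [if_pos (hab.trans hbc)]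
    by_cases e1 : a.2.1 = b.2.1 <;> by_cases e2 : b.2.1 = c.2.1
    · rw [if_pos e1] at h1; rw [if_pos e2] at h2
      rw [if_pos (e1.trans e2)]
      simp at *; omega
    · rw [if_pos e1] at h1; rw [if_neg e2] at h2
      rw [if_neg (e1 ▸ e2)]
      rw [e1]; exact h2
    · rw [if_neg e1] at h1; rw [if_pos e2] at h2
      rw [if_neg (e2 ▸ e1)]
      rw [← e2]; exact h1
    · rw [if_neg e1] at h1; rw [if_neg e2] at h2
      simp at h1 h2
      by_cases e3 : a.2.1 = c.2.1
      · omega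
      · rw [if_neg e3]; simp; omega
  · rw [if_pos hab] at h1
    rw [if_neg hbc] at h2
    rw [if_neg (hab ▸ hbc), hab]
    exact h2
  · rw [if_neg hab] at h1
    rw [if_pos hbc] at h2
    rw [if_neg (hbc ▸ hab), ← hbc]
    exact h1
  · rw [if_neg hab] at h1
    rw [if_neg hbc] at h2
    simp only [Bool.not_eq_true'] at h1 h2
    have hcb : kLe c.1 b.1 = true := by
      rcases kLe_total b.1 c.1 with h | h
      · rw [h] at h2; cases h2
      · exact h
    have hba : kLe b.1 a.1 = true := by
      rcases kLe_total a.1 b.1 with h | h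
      · rw [h] at h1; cases h1
      · exact h
    have hca : kLe c.1 a.1 = true := kLe_trans hcb hba
    have hac : ¬ a.1 = c.1 := by
      intro he
      have hx : kLe a.1 b.1 = true := he ▸ hcb
      rw [hx] at h1
      cases h1
    rw [if_neg hac]
    simp only [Bool.not_eq_true']
    by_cases h : kLe a.1 c.1 = true
    · exact absurd (kLe_antisymm h hca) hac
    · simpa using h

-- ---------- popMin facts ----------
theorem popMin_none_iff {pq : List EK} : popMin pq = none ↔ pq = [] := by
  cases pq with
  | nil => simp [popMin]
  | cons a t =>
    constructor
    · intro h
      have := popMin_isSome a t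
      rw [h] at this
      simp at this
    · intro h
      simp at h

theorem popMin_mem : ∀ {pq : List EK} {e : EK} {rest : List EK},
    popMin pq = some (e, rest) → e ∈ pq := by
  intro pq
  induction pq with
  | nil => intro e rest h; simp [popMin] at h
  | cons a t ih =>
    intro e rest h
    cases t with
    | nil => simp [popMin] at h; simp [h.1.symm]
    | cons b u =>
      rw [show popMin (a :: b :: u) =
        (match popMin (b :: u) with
         | none => some (a, [])
         | some (m, r') => if eLe a m then some (a, b :: u) else some (m, a :: r')) from rfl] at h
      rcases hp : popMin (b :: u) with _ | ⟨m, r'⟩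
      · have hns := popMin_isSome b u
        rw [hp] at hns
        simp at hns
      · rw [hp] at h
        dsimp only at h
        split_ifs at h with hle
        · injection h with hh
          have : e = a := (congrArg Prod.fst hh).symm
          simp [this]
        · injection h with hh
          have he : e = m := (congrArg Prod.fst hh).symm
          subst he
          exact List.mem_cons_of_mem a (ih hp)

theorem popMin_subset : ∀ {pq : List EK} {e : EK} {rest : List EK},
    popMin pq = some (e, rest) → ∀ x ∈ rest, x ∈ pq := by
  intro pq
  induction pq with
  | nil => intro e rest h; simp [popMin] at h
  | cons a t ih =>
    intro e rest h
    cases t with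
    | nil =>
      simp [popMin] at h
      obtain ⟨he, hr⟩ := h
      subst hr
      intro x hx
      simp at hx
    | cons b u =>
      rw [show popMin (a :: b :: u) =
        (match popMin (b :: u) with
         | none => some (a, [])
         | some (m, r') => if eLe a m then some (a, b :: u) else some (m, a :: r')) from rfl] at h
      rcases hp : popMin (b :: u) with _ | ⟨m, r'⟩
      · have hns := popMin_isSome b u
        rw [hp] at hns
        simp at hns
      · rw [hp] at h
        dsimp only at h
        split_ifs at h with hle
        · injection h with hh
          have : rest = b :: u := (congrArg Prod.snd hh).symm
          subst this
          intro x hx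
          exact List.mem_cons_of_mem a hx
        · injection h with hh
          have : rest = a :: r' := (congrArg Prod.snd hh).symm
          subst this
          intro x hx
          rcases List.mem_cons.mp hx with rfl | hx'
          · exact List.mem_cons_self
          · exact List.mem_cons_of_mem a (ih hp x hx')

theorem popMin_cover : ∀ {pq : List EK} {e : EK} {rest : List EK},
    popMin pq = some (e, rest) → ∀ x ∈ pq, x = e ∨ x ∈ rest := by
  intro pq
  induction pq with
  | nil => intro e rest h; simp [popMin] at h
  | cons a t ih =>
    intro e rest h
    cases t with
    | nil =>
      simp [popMin] at h
      intro x hx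
      simp at hx
      simp [hx, h.1.symm]
    | cons b u =>
      rw [show popMin (a :: b :: u) =
        (match popMin (b :: u) with
         | none => some (a, [])
         | some (m, r') => if eLe a m then some (a, b :: u) else some (m, a :: r')) from rfl] at h
      rcases hp : popMin (b :: u) with _ | ⟨m, r'⟩
      · have hns := popMin_isSome b u
        rw [hp] at hns
        simp at hns
      · rw [hp] at h
        dsimp only at h
        split_ifs at h with hle
        · injection h with hh
          have he : e = a := (congrArg Prod.fst hh).symm
          have hr : rest = b :: u := (congrArg Prod.snd hh).symm
          subst he; subst hr
          intro x hx
          rcases List.mem_cons.mp hx with rfl | hx'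
          · exact Or.inl rfl
          · exact Or.inr hx'
        · injection h with hh
          have he : e = m := (congrArg Prod.fst hh).symm
          have hr : rest = a :: r' := (congrArg Prod.snd hh).symm
          subst he; subst hr
          intro x hx
          rcases List.mem_cons.mp hx with rfl | hx'
          · exact Or.inr List.mem_cons_self
          · rcases ih hp x hx' with h' | h'
            · exact Or.inl h'
            · exact Or.inr (List.mem_cons_of_mem a h')

theorem popMin_min : ∀ {pq : List EK} {e : EK} {rest : List EK},
    popMin pq = some (e, rest) → ∀ x ∈ pq, eLe e x = true := by
  intro pq
  induction pq with
  | nil => intro e rest h; simp [popMin] at h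
  | cons a t ih =>
    intro e rest h
    cases t with
    | nil =>
      simp [popMin] at h
      intro x hx
      simp at hx
      simp [hx, h.1.symm, eLe_refl]
    | cons b u =>
      rw [show popMin (a :: b :: u) =
        (match popMin (b :: u) with
         | none => some (a, [])
         | some (m, r') => if eLe a m then some (a, b :: u) else some (m, a :: r')) from rfl] at h
      rcases hp : popMin (b :: u) with _ | ⟨m, r'⟩
      · have hns := popMin_isSome b u
        rw [hp] at hns
        simp at hns
      · rw [hp] at h
        dsimp only at h
        split_ifs at h with hle
        · injection h with hh
          have he : e = a := (congrArg Prod.fst hh).symm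
          subst he
          intro x hx
          rcases List.mem_cons.mp hx with rfl | hx'
          · exact eLe_refl x
          · exact eLe_trans hle (ih hp x hx')
        · injection h with hh
          have he : e = m := (congrArg Prod.fst hh).symm
          subst he
          intro x hx
          rcases List.mem_cons.mp hx with rfl | hx'
          · rcases eLe_total e x with h' | h'
            · exact h'
            · exact absurd h' (by simpa using hle)
          · exact ih hp x hx'

-- ---------- graph notions used by the specification-level argument ----------
-- the two value fields: fB is the natural read dist[r][c] (B), fA the transposed
-- read dist[c][r] that A's Dijkstra performs
def fB (dist : List (List KO)) (p : Int × Int) : KO := mAt dist p.1 p.2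
def fA (dist : List (List KO)) (p : Int × Int) : KO := mAt dist p.2 p.1
def inRn (n : Int) (p : Int × Int) : Prop := 0 ≤ p.1 ∧ p.1 < n ∧ 0 ≤ p.2 ∧ p.2 < n
def stepD (p q : Int × Int) : Prop := ∃ d ∈ dirs, q = (p.1 + d.1, p.2 + d.2)
def WalkTo (n : Int) (f : Int × Int → KO) (t : KO) (p : Int × Int)
    (l : List (Int × Int)) : Prop :=
  l.head? = some (0, 0) ∧ l.getLast? = some p ∧ l.IsChain stepD ∧
    ∀ x ∈ l, inRn n x ∧ kLe t (f x) = true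
def Reach (n : Int) (f : Int × Int → KO) (t : KO) (p : Int × Int) : Prop :=
  ∃ l, WalkTo n f t p l
def connS (n : Int) (f : Int × Int → KO) (t : KO) : Prop :=
  Reach n f t (n - 1, n - 1)

theorem walk_singleton (n : Int) (f : Int × Int → KO) (t : KO)
    (h1 : inRn n (0, 0)) (h2 : kLe t (f (0, 0)) = true) :
    WalkTo n f t (0, 0) [(0, 0)] := by
  refine ⟨rfl, rfl, List.IsChain.singleton ((0:Int),(0:Int)), ?_⟩
  intro x hx
  simp at hx
  subst hx
  exact ⟨h1, h2⟩

theorem walk_snoc {n : Int} {f : Int × Int → KO} {t : KO} {y x : Int × Int}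
    {l : List (Int × Int)} (hw : WalkTo n f t y l) (hstep : stepD y x)
    (hin : inRn n x) (hv : kLe t (f x) = true) :
    WalkTo n f t x (l ++ [x]) := by
  obtain ⟨h1, h2, h3, h4⟩ := hw
  refine ⟨?_, List.getLast?_concat, ?_, ?_⟩
  · cases l with
    | nil => simp at h1
    | cons a u => simpa using h1
  · refine List.IsChain.append h3 (List.IsChain.singleton x) ?_
    intro p hp q hq
    simp at hq
    subst hq
    rw [h2] at hp
    simp at hp
    subst hp
    exact hstep
  · intro z hz
    rcases List.mem_append.mp hz with hz' | hz'
    · exact h4 z hz'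
    · simp at hz'
      subst hz'
      exact ⟨hin, hv⟩

theorem walk_weaken {n : Int} {f : Int × Int → KO} {t t' : KO} {p : Int × Int}
    {l : List (Int × Int)} (hw : WalkTo n f t p l) (h : kLe t' t = true) :
    WalkTo n f t' p l := by
  obtain ⟨h1, h2, h3, h4⟩ := hw
  exact ⟨h1, h2, h3, fun x hx => ⟨(h4 x hx).1, kLe_trans h (h4 x hx).2⟩⟩

-- ---------- the transpose bijection: A's transposed field connects iff B's does ----------
theorem swap_mem_dirs {d : Int × Int} (h : d ∈ dirs) : (d.2, d.1) ∈ dirs := by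
  simp [dirs] at h ⊢
  rcases h with h | h | h | h <;> simp [h]

theorem stepD_swap {p q : Int × Int} (h : stepD p q) : stepD (p.2, p.1) (q.2, q.1) := by
  obtain ⟨d, hd, rfl⟩ := h
  exact ⟨(d.2, d.1), swap_mem_dirs hd, rfl⟩

theorem connS_swap (n : Int) (f : Int × Int → KO) (t : KO)
    (h : connS n (fun p => f (p.2, p.1)) t) : connS n f t := by
  obtain ⟨l, h1, h2, h3, h4⟩ := h
  refine ⟨l.map (fun p => (p.2, p.1)), ?_, ?_, ?_, ?_⟩
  · rw [List.head?_map, h1]; rfl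
  · rw [List.getLast?_map, h2]; rfl
  · rw [List.isChain_iff_getElem] at h3 ⊢
    intro i hi
    simp only [List.length_map] at hi
    simp only [List.getElem_map]
    exact stepD_swap (h3 i hi)
  · intro x hx
    obtain ⟨y, hy, rfl⟩ := List.mem_map.mp hx
    obtain ⟨⟨g1, g2, g3, g4⟩, gv⟩ := h4 y hy
    exact ⟨⟨g3, g4, g1, g2⟩, gv⟩

theorem connS_AB (n : Int) (dist : List (List KO)) (t : KO) :
    connS n (fA dist) t ↔ connS n (fB dist) t :=
  ⟨fun h => connS_swap n (fB dist) t h, fun h => connS_swap n (fA dist) t h⟩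

-- ---------- minimum of a list of values ----------
def kMinList (l : List KO) : KO := l.foldl kMin none

theorem foldl_kMin_le_init (l : List KO) : ∀ a, kLe (l.foldl kMin a) a = true := by
  induction l with
  | nil => intro a; exact kLe_refl a
  | cons x t ih =>
    intro a
    simp only [List.foldl_cons]
    exact kLe_trans (ih (kMin a x)) (kMin_le_left a x)

theorem foldl_kMin_le_mem (l : List KO) : ∀ a, ∀ x ∈ l, kLe (l.foldl kMin a) x = true := by
  induction l with
  | nil => intro a x hx; simp at hx
  | cons y t ih =>
    intro a x hx
    simp only [List.foldl_cons]
    rcases List.mem_cons.mp hx with rfl | hx'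
    · exact kLe_trans (foldl_kMin_le_init t (kMin a x)) (kMin_le_right a x)
    · exact ih (kMin a y) x hx'

theorem kMinList_le (l : List KO) : ∀ x ∈ l, kLe (kMinList l) x = true :=
  foldl_kMin_le_mem l none

theorem foldl_kMin_mem (l : List KO) : ∀ a, l.foldl kMin a = a ∨ l.foldl kMin a ∈ l := by
  induction l with
  | nil => intro a; exact Or.inl rfl
  | cons x t ih =>
    intro a
    simp only [List.foldl_cons]
    rcases ih (kMin a x) with h | h
    · rw [h]
      unfold kMin
      split_ifs
      · exact Or.inl rfl
      · exact Or.inr List.mem_cons_self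
    · exact Or.inr (List.mem_cons_of_mem x h)

theorem kMinList_mem (l : List KO) (h : l ≠ []) : kMinList l ∈ l := by
  cases l with
  | nil => exact absurd rfl h
  | cons x t =>
    unfold kMinList
    simp only [List.foldl_cons]
    have hnx : kMin (none : KO) x = x := by
      unfold kMin kLe
      cases x <;> simp
    rw [hnx]
    rcases foldl_kMin_mem t x with h' | h'
    · rw [h']; exact List.mem_cons_self
    · exact List.mem_cons_of_mem x h'

theorem le_foldl_kMin {k : KO} (l : List KO) : ∀ a, kLe k a = true →
    (∀ x ∈ l, kLe k x = true) → kLe k (l.foldl kMin a) = true := by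
  induction l with
  | nil => intro a ha _; exact ha
  | cons x t ih =>
    intro a ha h
    simp only [List.foldl_cons]
    exact ih (kMin a x) (le_kMin ha (h x List.mem_cons_self))
      (fun z hz => h z (List.mem_cons_of_mem x hz))

theorem le_kMinList {k : KO} (l : List KO) (h : ∀ x ∈ l, kLe k x = true) :
    kLe k (kMinList l) = true := by
  refine le_foldl_kMin l none ?_ h
  unfold kLe
  cases k <;> simp

-- the bottleneck value of a walk: it is a grid value, it connects, and it dominates t
theorem walk_bottleneck {n : Int} {f : Int × Int → KO} {t : KO} {p : Int × Int}
    {l : List (Int × Int)} (hw : WalkTo n f t p l) :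
    kLe t (kMinList (l.map f)) = true ∧
      WalkTo n f (kMinList (l.map f)) p l ∧
      ∃ q, inRn n q ∧ f q = kMinList (l.map f) := by
  obtain ⟨h1, h2, h3, h4⟩ := hw
  have hne : l ≠ [] := by
    intro he
    rw [he] at h1
    simp at h1
  refine ⟨?_, ⟨h1, h2, h3, ?_⟩, ?_⟩
  · refine le_kMinList _ ?_
    intro x hx
    obtain ⟨q, hq, rfl⟩ := List.mem_map.mp hx
    exact (h4 q hq).2
  · intro x hx
    exact ⟨(h4 x hx).1, kMinList_le _ _ (List.mem_map.mpr ⟨x, hx, rfl⟩)⟩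
  · have hm := kMinList_mem (l.map f) (by simpa using hne)
    obtain ⟨q, hq, hqe⟩ := List.mem_map.mp hm
    exact ⟨q, (h4 q hq).1, hqe⟩

-- ---------- fold facts for A's relaxation ----------
theorem relaxA_step_cases (n : Int) (dist : List (List KO)) (s : KO) (r c : Int)
    (st : List EK × List (Int × Int)) (d : Int × Int) :
    relaxA n dist s r c st d = st ∨
      (inRn n (r + d.1, c + d.2) ∧ (r + d.1, c + d.2) ∉ st.2 ∧
        relaxA n dist s r c st d =
          (st.1 ++ [(kMin s (fA dist (r + d.1, c + d.2)), (r + d.1, c + d.2))],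
            PySem.Set.add st.2 (r + d.1, c + d.2))) := by
  unfold relaxA
  dsimp only
  split_ifs with hg
  · exact Or.inr ⟨⟨hg.1, hg.2.1, hg.2.2.1, hg.2.2.2.1⟩, hg.2.2.2.2, rfl⟩
  · exact Or.inl rfl

theorem relaxA_pq_mono (n : Int) (dist : List (List KO)) (s : KO) (r c : Int)
    (ds : List (Int × Int)) (st : List EK × List (Int × Int)) :
    ∀ e ∈ st.1, e ∈ (ds.foldl (relaxA n dist s r c) st).1 := by
  induction ds generalizing st with
  | nil => intro e he; exact he
  | cons d ds ih =>
    intro e he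
    simp only [List.foldl_cons]
    refine ih _ e ?_
    rcases relaxA_step_cases n dist s r c st d with h | ⟨_, _, h⟩ <;> rw [h]
    · exact he
    · exact List.mem_append.mpr (Or.inl he)

theorem relaxA_vis_mono (n : Int) (dist : List (List KO)) (s : KO) (r c : Int)
    (ds : List (Int × Int)) (st : List EK × List (Int × Int)) :
    ∀ x ∈ st.2, x ∈ (ds.foldl (relaxA n dist s r c) st).2 := by
  induction ds generalizing st with
  | nil => intro x hx; exact hx
  | cons d ds ih =>
    intro x hx
    simp only [List.foldl_cons]
    refine ih _ x ?_
    rcases relaxA_step_cases n dist s r c st d with h | ⟨_, _, h⟩ <;> rw [h]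
    · exact hx
    · exact (PySem.Set.mem_add _ _ _).mpr (Or.inl hx)

theorem relaxA_vis_new (n : Int) (dist : List (List KO)) (s : KO) (r c : Int)
    (ds : List (Int × Int)) (hds : ∀ d ∈ ds, d ∈ dirs) (st : List EK × List (Int × Int)) :
    ∀ x ∈ (ds.foldl (relaxA n dist s r c) st).2, x ∈ st.2 ∨
      (stepD (r, c) x ∧ inRn n x ∧
        (kMin s (fA dist x), x) ∈ (ds.foldl (relaxA n dist s r c) st).1) := by
  induction ds generalizing st with
  | nil => intro x hx; exact Or.inl hx
  | cons d ds ih =>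
    intro x hx
    simp only [List.foldl_cons] at hx ⊢
    rcases ih (fun d' hd' => hds d' (List.mem_cons_of_mem d hd')) _ x hx with h | h
    · rcases relaxA_step_cases n dist s r c st d with hc | ⟨hin, hnm, hc⟩
      · rw [hc] at h
        exact Or.inl h
      · rw [hc] at h
        rcases (PySem.Set.mem_add _ _ _).mp h with h' | h'
        · exact Or.inl h'
        · subst h'
          refine Or.inr ⟨⟨d, hds d List.mem_cons_self, rfl⟩, hin, ?_⟩
          refine relaxA_pq_mono n dist s r c ds _ _ ?_
          rw [hc]
          exact List.mem_append.mpr (Or.inr List.mem_cons_self)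
    · exact Or.inr h

theorem relaxA_pq_new (n : Int) (dist : List (List KO)) (s : KO) (r c : Int)
    (ds : List (Int × Int)) (hds : ∀ d ∈ ds, d ∈ dirs) (st : List EK × List (Int × Int)) :
    ∀ e ∈ (ds.foldl (relaxA n dist s r c) st).1, e ∈ st.1 ∨
      ∃ x, e = (kMin s (fA dist x), x) ∧ stepD (r, c) x ∧ inRn n x ∧
        x ∈ (ds.foldl (relaxA n dist s r c) st).2 := by
  induction ds generalizing st with
  | nil => intro e he; exact Or.inl he
  | cons d ds ih =>
    intro e he
    simp only [List.foldl_cons] at he ⊢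
    rcases ih (fun d' hd' => hds d' (List.mem_cons_of_mem d hd')) _ e he with h | h
    · rcases relaxA_step_cases n dist s r c st d with hc | ⟨hin, hnm, hc⟩
      · rw [hc] at h
        exact Or.inl h
      · rw [hc] at h
        rcases List.mem_append.mp h with h' | h'
        · exact Or.inl h'
        · simp at h'
          subst h'
          refine Or.inr ⟨(r + d.1, c + d.2), rfl, ⟨d, hds d List.mem_cons_self, rfl⟩, hin, ?_⟩
          refine relaxA_vis_mono n dist s r c ds _ _ ?_
          rw [hc]
          exact (PySem.Set.mem_add _ _ _).mpr (Or.inr rfl)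
    · obtain ⟨x, he', hs', hi', hv'⟩ := h
      exact Or.inr ⟨x, he', hs', hi', hv'⟩

theorem relaxA_coverage (n : Int) (dist : List (List KO)) (s : KO) (r c : Int)
    (ds : List (Int × Int)) (st : List EK × List (Int × Int)) :
    ∀ d ∈ ds, inRn n (r + d.1, c + d.2) →
      (r + d.1, c + d.2) ∈ (ds.foldl (relaxA n dist s r c) st).2 := by
  induction ds generalizing st with
  | nil => intro d hd; simp at hd
  | cons d0 ds ih =>
    intro d hd hin
    simp only [List.foldl_cons]
    rcases List.mem_cons.mp hd with rfl | hd'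
    · refine relaxA_vis_mono n dist s r c ds _ _ ?_
      by_cases hm : (r + d.1, c + d.2) ∈ st.2
      · rcases relaxA_step_cases n dist s r c st d with hc | ⟨_, _, hc⟩ <;> rw [hc]
        · exact hm
        · exact (PySem.Set.mem_add _ _ _).mpr (Or.inl hm)
      · unfold relaxA
        dsimp only
        split_ifs with hg
        · exact (PySem.Set.mem_add _ _ _).mpr (Or.inr rfl)
        · exact absurd ⟨hin.1, hin.2.1, hin.2.2.1, hin.2.2.2, hm⟩ hg
    · exact ih _ d hd' hin

-- ---------- fold facts for B's flood relaxation ----------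
theorem relaxF_step_cases (n : Int) (dist : List (List KO)) (t : KO) (r c : Int)
    (st : List (Int × Int) × List (Int × Int)) (d : Int × Int) :
    relaxF n dist t r c st d = st ∨
      (inRn n (r + d.1, c + d.2) ∧ (r + d.1, c + d.2) ∉ st.2 ∧
        kLe t (fB dist (r + d.1, c + d.2)) = true ∧
        relaxF n dist t r c st d =
          ((r + d.1, c + d.2) :: st.1, PySem.Set.add st.2 (r + d.1, c + d.2))) := by
  unfold relaxF
  dsimp only
  split_ifs with hg
  · exact Or.inr ⟨⟨hg.1, hg.2.1, hg.2.2.1, hg.2.2.2.1⟩, hg.2.2.2.2.1, hg.2.2.2.2.2, rfl⟩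
  · exact Or.inl rfl

theorem relaxF_vis_mono (n : Int) (dist : List (List KO)) (t : KO) (r c : Int)
    (ds : List (Int × Int)) (st : List (Int × Int) × List (Int × Int)) :
    ∀ x ∈ st.2, x ∈ (ds.foldl (relaxF n dist t r c) st).2 := by
  induction ds generalizing st with
  | nil => intro x hx; exact hx
  | cons d ds ih =>
    intro x hx
    simp only [List.foldl_cons]
    refine ih _ x ?_
    rcases relaxF_step_cases n dist t r c st d with h | ⟨_, _, _, h⟩ <;> rw [h]
    · exact hx
    · exact (PySem.Set.mem_add _ _ _).mpr (Or.inl hx)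

theorem relaxF_stack_mono (n : Int) (dist : List (List KO)) (t : KO) (r c : Int)
    (ds : List (Int × Int)) (st : List (Int × Int) × List (Int × Int)) :
    ∀ x ∈ st.1, x ∈ (ds.foldl (relaxF n dist t r c) st).1 := by
  induction ds generalizing st with
  | nil => intro x hx; exact hx
  | cons d ds ih =>
    intro x hx
    simp only [List.foldl_cons]
    refine ih _ x ?_
    rcases relaxF_step_cases n dist t r c st d with h | ⟨_, _, _, h⟩ <;> rw [h]
    · exact hx
    · exact List.mem_cons_of_mem _ hx

theorem relaxF_stack_sub (n : Int) (dist : List (List KO)) (t : KO) (r c : Int)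
    (ds : List (Int × Int)) (st : List (Int × Int) × List (Int × Int)) :
    ∀ x ∈ (ds.foldl (relaxF n dist t r c) st).1, x ∈ st.1 ∨
      x ∈ (ds.foldl (relaxF n dist t r c) st).2 := by
  induction ds generalizing st with
  | nil => intro x hx; exact Or.inl hx
  | cons d ds ih =>
    intro x hx
    simp only [List.foldl_cons] at hx ⊢
    rcases ih _ x hx with h | h
    · rcases relaxF_step_cases n dist t r c st d with hc | ⟨_, _, _, hc⟩
      · rw [hc] at h
        exact Or.inl h
      · rw [hc] at h
        rcases List.mem_cons.mp h with h' | h'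
        · refine Or.inr (relaxF_vis_mono n dist t r c ds _ _ ?_)
          rw [hc, h']
          exact (PySem.Set.mem_add _ _ _).mpr (Or.inr rfl)
        · exact Or.inl h'
    · exact Or.inr h

theorem relaxF_vis_new (n : Int) (dist : List (List KO)) (t : KO) (r c : Int)
    (ds : List (Int × Int)) (hds : ∀ d ∈ ds, d ∈ dirs) (st : List (Int × Int) × List (Int × Int)) :
    ∀ x ∈ (ds.foldl (relaxF n dist t r c) st).2, x ∈ st.2 ∨
      (stepD (r, c) x ∧ inRn n x ∧ kLe t (fB dist x) = true ∧
        x ∈ (ds.foldl (relaxF n dist t r c) st).1) := by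
  induction ds generalizing st with
  | nil => intro x hx; exact Or.inl hx
  | cons d ds ih =>
    intro x hx
    simp only [List.foldl_cons] at hx ⊢
    rcases ih (fun d' hd' => hds d' (List.mem_cons_of_mem d hd')) _ x hx with h | h
    · rcases relaxF_step_cases n dist t r c st d with hc | ⟨hin, hnm, hv, hc⟩
      · rw [hc] at h
        exact Or.inl h
      · rw [hc] at h
        rcases (PySem.Set.mem_add _ _ _).mp h with h' | h'
        · exact Or.inl h'
        · subst h'
          refine Or.inr ⟨⟨d, hds d List.mem_cons_self, rfl⟩, hin, hv, ?_⟩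
          refine relaxF_stack_mono n dist t r c ds _ _ ?_
          rw [hc]
          exact List.mem_cons_self
    · exact Or.inr h

theorem relaxF_coverage (n : Int) (dist : List (List KO)) (t : KO) (r c : Int)
    (ds : List (Int × Int)) (st : List (Int × Int) × List (Int × Int)) :
    ∀ d ∈ ds, inRn n (r + d.1, c + d.2) → kLe t (fB dist (r + d.1, c + d.2)) = true →
      (r + d.1, c + d.2) ∈ (ds.foldl (relaxF n dist t r c) st).2 := by
  induction ds generalizing st with
  | nil => intro d hd; simp at hd
  | cons d0 ds ih =>
    intro d hd hin hv
    simp only [List.foldl_cons]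
    rcases List.mem_cons.mp hd with rfl | hd'
    · refine relaxF_vis_mono n dist t r c ds _ _ ?_
      by_cases hm : (r + d.1, c + d.2) ∈ st.2
      · rcases relaxF_step_cases n dist t r c st d with hc | ⟨_, _, _, hc⟩ <;> rw [hc]
        · exact hm
        · exact (PySem.Set.mem_add _ _ _).mpr (Or.inl hm)
      · unfold relaxF
        dsimp only
        split_ifs with hg
        · exact (PySem.Set.mem_add _ _ _).mpr (Or.inr rfl)
        · exact absurd ⟨hin.1, hin.2.1, hin.2.2.1, hin.2.2.2, hm, hv⟩ hg
    · exact ih _ d hd' hin hv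

-- ---------- flood-fill correctness ----------
theorem flood_main (n : Int) (dist : List (List KO)) (t : KO) :
    ∀ stack seen,
      (∀ x ∈ stack, x ∈ seen) →
      (∀ x ∈ seen, Reach n (fB dist) t x) →
      (∀ x ∈ seen, x ∉ stack → ∀ d ∈ dirs, inRn n (x.1 + d.1, x.2 + d.2) →
        kLe t (fB dist (x.1 + d.1, x.2 + d.2)) = true → (x.1 + d.1, x.2 + d.2) ∈ seen) →
      (∀ x ∈ seen, x ∈ floodLoop n dist t stack seen) ∧
        (∀ x ∈ floodLoop n dist t stack seen, Reach n (fB dist) t x) ∧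
        (∀ x ∈ floodLoop n dist t stack seen, ∀ d ∈ dirs,
          inRn n (x.1 + d.1, x.2 + d.2) → kLe t (fB dist (x.1 + d.1, x.2 + d.2)) = true →
            (x.1 + d.1, x.2 + d.2) ∈ floodLoop n dist t stack seen) := by
  intro stack seen
  induction stack, seen using floodLoop.induct n dist t with
  | case1 seen =>
    intro hss hreach hclosed
    rw [show floodLoop n dist t [] seen = seen from by rw [floodLoop]]
    exact ⟨fun x hx => hx, hreach, fun x hx d hd hin hv => hclosed x hx (by simp) d hd hin hv⟩
  | case2 r c stack' seen st ih =>
    intro hss hreach hclosed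
    have hstdef : st = List.foldl (relaxF n dist t r c) (stack', seen) dirs := rfl
    have hrc : (r, c) ∈ seen := hss (r, c) List.mem_cons_self
    have hreach_rc : Reach n (fB dist) t (r, c) := hreach _ hrc
    have hss' : ∀ x ∈ st.1, x ∈ st.2 := by
      intro x hx
      rcases relaxF_stack_sub n dist t r c dirs (stack', seen) x hx with h | h
      · exact relaxF_vis_mono n dist t r c dirs (stack', seen) x
          (hss x (List.mem_cons_of_mem _ h))
      · exact h
    have hreach' : ∀ x ∈ st.2, Reach n (fB dist) t x := by
      intro x hx
      rcases relaxF_vis_new n dist t r c dirs (fun d hd => hd) (stack', seen) x hx with h | h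
      · exact hreach x h
      · obtain ⟨hst, hin, hv, _⟩ := h
        obtain ⟨l, hw⟩ := hreach_rc
        exact ⟨l ++ [x], walk_snoc hw hst hin hv⟩
    have hclosed' : ∀ x ∈ st.2, x ∉ st.1 → ∀ d ∈ dirs,
        inRn n (x.1 + d.1, x.2 + d.2) → kLe t (fB dist (x.1 + d.1, x.2 + d.2)) = true →
          (x.1 + d.1, x.2 + d.2) ∈ st.2 := by
      intro x hx hnx d hd hin hv
      by_cases hxrc : x = (r, c)
      · subst hxrc
        rw [hstdef]
        exact relaxF_coverage n dist t r c dirs (stack', seen) d hd hin hv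
      · rcases relaxF_vis_new n dist t r c dirs (fun d hd => hd) (stack', seen) x hx with h | h
        · by_cases hxs : x ∈ stack'
          · exact absurd (relaxF_stack_mono n dist t r c dirs (stack', seen) x hxs) hnx
          · have hxstack : x ∉ (r, c) :: stack' := by
              intro hc
              rcases List.mem_cons.mp hc with h' | h'
              · exact hxrc h'
              · exact hxs h'
            exact relaxF_vis_mono n dist t r c dirs (stack', seen) _
              (hclosed x h hxstack d hd hin hv)
        · exact absurd h.2.2.2 hnx
    have hmain := ih hss' hreach' hclosed'
    rw [show floodLoop n dist t ((r, c) :: stack') seen = floodLoop n dist t st.1 st.2 from by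
      rw [floodLoop]]
    refine ⟨?_, hmain.2.1, hmain.2.2⟩
    intro x hx
    exact hmain.1 x (relaxF_vis_mono n dist t r c dirs (stack', seen) x hx)

theorem walk_in_closed {n : Int} {f : Int × Int → KO} {t : KO} {p : Int × Int}
    {l : List (Int × Int)} {R : List (Int × Int)}
    (hw : WalkTo n f t p l) (h0 : (0, 0) ∈ R)
    (hcl : ∀ x ∈ R, ∀ d ∈ dirs, inRn n (x.1 + d.1, x.2 + d.2) →
      kLe t (f (x.1 + d.1, x.2 + d.2)) = true → (x.1 + d.1, x.2 + d.2) ∈ R) :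
    p ∈ R := by
  obtain ⟨h1, h2, h3, h4⟩ := hw
  have hne : 0 < l.length := by
    cases l with
    | nil => simp at h1
    | cons a u => simp
  have hidx : ∀ i (hi : i < l.length), l[i]'hi ∈ R := by
    intro i
    induction i with
    | zero =>
      intro hi
      rw [List.head?_eq_getElem?, List.getElem?_eq_getElem (by omega)] at h1
      have : l[0] = (0, 0) := by simpa using h1
      rw [this]
      exact h0
    | succ i ihh =>
      intro hi
      have hstep := (List.isChain_iff_getElem.mp h3) i (by omega)
      obtain ⟨d, hd, heq⟩ := hstep
      have hxin : (l[i + 1]'(by omega)) ∈ l := List.getElem_mem _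
      have h4' := h4 _ hxin
      rw [heq]
      exact hcl _ (ihh (by omega)) d hd (heq ▸ h4'.1) (heq ▸ h4'.2)
  have hlast : l[l.length - 1]'(by omega) = p := by
    rw [List.getLast?_eq_getElem?, List.getElem?_eq_getElem (by omega)] at h2
    simpa using h2
  rw [← hlast]
  exact hidx (l.length - 1) (by omega)

theorem connB_iff (n : Int) (dist : List (List KO)) (t : KO) (hn : 1 ≤ n) :
    connB n dist t = true ↔ connS n (fB dist) t := by
  unfold connB
  have hseen : PySem.Set.ofList [((0 : Int), (0 : Int))] = [((0 : Int), (0 : Int))] := rfl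
  by_cases hg : kLe t (mAt dist 0 0) = true
  · rw [if_pos hg]
    have hm := flood_main n dist t [((0 : Int), (0 : Int))] (PySem.Set.ofList [((0 : Int), (0 : Int))])
      (by rw [hseen]; intro x hx; exact hx)
      (by
        rw [hseen]
        intro x hx
        simp at hx
        subst hx
        exact ⟨[(0, 0)], walk_singleton n (fB dist) t ⟨le_refl 0, by omega, le_refl 0, by omega⟩ hg⟩)
      (by
        rw [hseen]
        intro x hx hnx
        simp at hx
        exact absurd (by simp [hx] : x ∈ [((0 : Int), (0 : Int))]) hnx)
    constructor
    · intro h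
      have : (n - 1, n - 1) ∈ floodLoop n dist t [((0 : Int), (0 : Int))]
          (PySem.Set.ofList [((0 : Int), (0 : Int))]) := of_decide_eq_true h
      exact hm.2.1 _ this
    · intro h
      obtain ⟨l, hw⟩ := h
      refine decide_eq_true ?_
      refine walk_in_closed hw ?_ hm.2.2
      refine hm.1 _ ?_
      rw [hseen]
      simp
  · rw [if_neg hg]
    constructor
    · intro h
      cases h
    · intro h
      obtain ⟨l, hw⟩ := h
      obtain ⟨h1, h2, h3, h4⟩ := hw
      exact absurd ((h4 _ (List.mem_of_mem_head? h1)).2) hg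

-- ---------- sorting facts ----------
theorem mem_insDesc (x : KO) (l : List KO) (y : KO) :
    y ∈ insDesc x l ↔ y = x ∨ y ∈ l := by
  induction l with
  | nil => simp [insDesc]
  | cons z t ih =>
    unfold insDesc
    split_ifs with h
    · simp only [List.mem_cons, ih]
      tauto
    · simp only [List.mem_cons]

theorem pairwise_insDesc (x : KO) (l : List KO)
    (h : l.Pairwise (fun a b => kLe b a = true)) :
    (insDesc x l).Pairwise (fun a b => kLe b a = true) := by
  induction l with
  | nil => simp [insDesc]
  | cons z t ih =>
    unfold insDesc
    rw [List.pairwise_cons] at h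
    split_ifs with hc
    · rw [List.pairwise_cons]
      constructor
      · intro y hy
        rcases (mem_insDesc x t y).mp hy with rfl | hy'
        · exact hc
        · exact h.1 y hy'
      · exact ih h.2
    · rw [List.pairwise_cons]
      have hzx : kLe z x = true := by
        rcases kLe_total x z with h' | h'
        · exact absurd h' hc
        · exact h'
      constructor
      · intro y hy
        rcases List.mem_cons.mp hy with rfl | hy'
        · exact hzx
        · exact kLe_trans (h.1 y hy') hzx
      · exact List.pairwise_cons.mpr ⟨h.1, h.2⟩

theorem sortAux : ∀ (l acc : List KO), acc.Pairwise (fun a b => kLe b a = true) →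
    (l.foldl (fun a x => insDesc x a) acc).Pairwise (fun a b => kLe b a = true) ∧
      (∀ y, y ∈ l.foldl (fun a x => insDesc x a) acc ↔ y ∈ acc ∨ y ∈ l) := by
  intro l
  induction l with
  | nil =>
    intro acc h
    exact ⟨h, fun y => by simp⟩
  | cons x t ih =>
    intro acc h
    simp only [List.foldl_cons]
    obtain ⟨hs, hm⟩ := ih (insDesc x acc) (pairwise_insDesc x acc h)
    refine ⟨hs, fun y => ?_⟩
    rw [hm y, mem_insDesc]
    simp only [List.mem_cons]
    tauto

theorem sortDescK_facts (l : List KO) :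
    (sortDescK l).Pairwise (fun a b => kLe b a = true) ∧
      (∀ y, y ∈ sortDescK l ↔ y ∈ l) := by
  obtain ⟨hs, hm⟩ := sortAux l [] List.Pairwise.nil
  refine ⟨hs, fun y => ?_⟩
  rw [sortDescK, hm y]
  simp

-- ---------- the threshold search returns the best connecting value ----------
theorem search_first (n : Int) (dist : List (List KO)) :
    ∀ ts : List KO, ts.Pairwise (fun a b => kLe b a = true) →
      (∃ x ∈ ts, connB n dist x = true) →
      ∃ tk, tk ∈ ts ∧ connB n dist tk = true ∧
        (∀ x ∈ ts, connB n dist x = true → kLe x tk = true) ∧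
        searchLoop n dist ts = tk.getD 0 := by
  intro ts
  induction ts with
  | nil =>
    intro _ hex
    simp at hex
  | cons t ts ih =>
    intro hp hex
    rw [List.pairwise_cons] at hp
    by_cases hc : connB n dist t = true
    · refine ⟨t, List.mem_cons_self, hc, ?_, ?_⟩
      · intro x hx _
        rcases List.mem_cons.mp hx with rfl | hx'
        · exact kLe_refl x
        · exact hp.1 x hx'
      · unfold searchLoop
        rw [if_pos hc]
    · have hex' : ∃ x ∈ ts, connB n dist x = true := by
        obtain ⟨x, hx, hcx⟩ := hex
        rcases List.mem_cons.mp hx with rfl | hx'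
        · exact absurd hcx hc
        · exact ⟨x, hx', hcx⟩
      obtain ⟨tk, h1, h2, h3, h4⟩ := ih hp.2 hex'
      refine ⟨tk, List.mem_cons_of_mem t h1, h2, ?_, ?_⟩
      · intro x hx hcx
        rcases List.mem_cons.mp hx with rfl | hx'
        · exact absurd hcx hc
        · exact h3 x hx' hcx
      · unfold searchLoop
        rw [if_neg (by simp [hc]), h4]

theorem mem_valsB (n : Int) (dist : List (List KO)) (x : KO) :
    x ∈ valsB n dist ↔ ∃ p, inRn n p ∧ fB dist p = x := by
  unfold valsB
  rw [PySem.Set.mem_ofList]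
  rw [List.mem_map]
  constructor
  · rintro ⟨p, hp, rfl⟩
    exact ⟨p, mem_cells.mp hp, rfl⟩
  · rintro ⟨p, hp, rfl⟩
    exact ⟨p, mem_cells.mpr ⟨hp.1, hp.2.1, hp.2.2.1, hp.2.2.2⟩, rfl⟩

-- every in-range cell is joined to (0,0) by an in-range walk
theorem reach_all_aux (n : Int) (hn : 1 ≤ n) : ∀ N (a b : Int), inRn n (a, b) →
    (a + b).toNat ≤ N →
    ∃ l : List (Int × Int), l.head? = some (0, 0) ∧ l.getLast? = some (a, b) ∧
      l.IsChain stepD ∧ ∀ x ∈ l, inRn n x := by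
  intro N
  induction N with
  | zero =>
    intro a b hab hN
    obtain ⟨h1, h2, h3, h4⟩ := hab
    have ha : a = 0 := by simp at h1 h3 ⊢; omega
    have hb : b = 0 := by simp at h1 h3 ⊢; omega
    subst ha; subst hb
    exact ⟨[(0, 0)], rfl, rfl, List.IsChain.singleton _, by
      intro x hx; simp at hx; subst hx; exact ⟨le_refl 0, by omega, le_refl 0, by omega⟩⟩
  | succ N ih =>
    intro a b hab hN
    obtain ⟨h1, h2, h3, h4⟩ := hab
    by_cases hb : 0 < b
    · obtain ⟨l, g1, g2, g3, g4⟩ := ih a (b - 1) ⟨h1, h2, by omega, by omega⟩ (by simp at hN ⊢; omega)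
      refine ⟨l ++ [(a, b)], ?_, List.getLast?_concat, ?_, ?_⟩
      · cases l with
        | nil => simp at g1
        | cons z u => simpa using g1
      · refine List.IsChain.append g3 (List.IsChain.singleton _) ?_
        intro u hu v hv
        simp at hv
        subst hv
        rw [g2] at hu
        simp at hu
        subst hu
        refine ⟨(0, 1), by simp [dirs], by simp⟩
      · intro x hx
        rcases List.mem_append.mp hx with hx' | hx'
        · exact g4 x hx'
        · simp at hx'
          subst hx'
          exact ⟨h1, h2, h3, h4⟩
    · by_cases ha : 0 < a
      · obtain ⟨l, g1, g2, g3, g4⟩ := ih (a - 1) b ⟨by omega, by omega, h3, h4⟩ (by simp at hN ⊢; omega)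
        refine ⟨l ++ [(a, b)], ?_, List.getLast?_concat, ?_, ?_⟩
        · cases l with
          | nil => simp at g1
          | cons z u => simpa using g1
        · refine List.IsChain.append g3 (List.IsChain.singleton _) ?_
          intro u hu v hv
          simp at hv
          subst hv
          rw [g2] at hu
          simp at hu
          subst hu
          refine ⟨(1, 0), by simp [dirs], by simp⟩
        · intro x hx
          rcases List.mem_append.mp hx with hx' | hx'
          · exact g4 x hx'
          · simp at hx'
            subst hx'
            exact ⟨h1, h2, h3, h4⟩
      · have ha0 : a = 0 := by omega
        have hb0 : b = 0 := by omega
        subst ha0; subst hb0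
        exact ⟨[(0, 0)], rfl, rfl, List.IsChain.singleton _, by
          intro x hx; simp at hx; subst hx; exact ⟨le_refl 0, by omega, le_refl 0, by omega⟩⟩

theorem reach_all (n : Int) (hn : 1 ≤ n) (p : Int × Int) (hp : inRn n p) :
    ∃ l : List (Int × Int), l.head? = some (0, 0) ∧ l.getLast? = some p ∧
      l.IsChain stepD ∧ ∀ x ∈ l, inRn n x := by
  obtain ⟨a, b⟩ := p
  exact reach_all_aux n hn (a + b).toNat a b hp le_rfl

theorem exists_conn (n : Int) (dist : List (List KO)) (hn : 1 ≤ n) :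
    ∃ x ∈ valsB n dist, connB n dist x = true := by
  obtain ⟨l, g1, g2, g3, g4⟩ := reach_all n hn (n - 1, n - 1) ⟨by omega, by omega, by omega, by omega⟩
  have hw : WalkTo n (fB dist) (kMinList (l.map (fB dist))) (n - 1, n - 1) l := by
    refine ⟨g1, g2, g3, ?_⟩
    intro x hx
    exact ⟨g4 x hx, kMinList_le _ _ (List.mem_map.mpr ⟨x, hx, rfl⟩)⟩
  have hne : l ≠ [] := by
    intro he
    rw [he] at g1
    simp at g1
  have hm := kMinList_mem (l.map (fB dist)) (by simpa using hne)
  obtain ⟨q, hq, hqe⟩ := List.mem_map.mp hm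
  refine ⟨kMinList (l.map (fB dist)), ?_, ?_⟩
  · exact (mem_valsB n dist _).mpr ⟨q, g4 q hq, hqe⟩
  · exact (connB_iff n dist _ hn).mpr ⟨l, hw⟩

-- ---------- A's Dijkstra loop returns the best connecting threshold ----------
theorem loopA_eq (n : Int) (dist : List (List KO)) (pq : List EK) (vis : List (Int × Int)) :
    loopA n dist pq vis =
      match popMin pq with
      | none => 0
      | some (e, rest) =>
          if e.2.1 = n - 1 ∧ e.2.2 = n - 1 then e.1.getD 0
          else
            loopA n dist (dirs.foldl (relaxA n dist e.1 e.2.1 e.2.2) (rest, vis)).1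
              (dirs.foldl (relaxA n dist e.1 e.2.1 e.2.2) (rest, vis)).2 := by
  rw [loopA]
  rcases hp : popMin pq with _ | ⟨e, rest⟩ <;> simp [hp]

theorem dijk_main (n : Int) (dist : List (List KO)) (tk : KO) (l : List (Int × Int))
    (hw : WalkTo n (fA dist) tk (n - 1, n - 1) l)
    (hmax : ∀ k, connS n (fA dist) k → kLe k tk = true) :
    ∀ N pq vis, pq.length + unvis n vis ≤ N →
      (∀ e ∈ pq, Reach n (fA dist) e.1 e.2 ∧ e.2 ∈ vis) →
      (∃ i, ∃ hi : i < l.length, (∃ k, (k, l[i]) ∈ pq ∧ kLe tk k = true) ∧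
        ∀ j, i < j → ∀ hj : j < l.length, l[j] ∉ vis) →
      loopA n dist pq vis = tk.getD 0 := by
  have hg : ∀ j (hj : j < l.length), l.getD j ((0 : Int), (0 : Int)) = l[j] :=
    fun j hj => List.getD_eq_getElem l _ hj
  intro N
  induction N with
  | zero =>
    intro pq vis hN h1 h2
    obtain ⟨i, hi, ⟨k, hkmem, hkle⟩, hunv⟩ := h2
    have hpq : pq = [] := List.length_eq_zero_iff.mp (by omega)
    subst hpq
    simp at hkmem
  | succ N ih =>
    intro pq vis hN h1 h2
    obtain ⟨i, hi, ⟨k, hkmem, hkle⟩, hunv⟩ := h2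
    rw [loopA_eq]
    rcases hp : popMin pq with _ | ⟨⟨ek, er, ec⟩, rest⟩
    · rw [popMin_none_iff.mp hp] at hkmem
      simp at hkmem
    · dsimp only
      have hemem := popMin_mem hp
      have htk_e : kLe tk ek = true :=
        kLe_trans hkle (eLe_key (popMin_min hp _ hkmem))
      by_cases htgt : er = n - 1 ∧ ec = n - 1
      · rw [if_pos htgt]
        have hr : Reach n (fA dist) ek (er, ec) := (h1 _ hemem).1
        rw [htgt.1, htgt.2] at hr
        rw [kLe_antisymm (hmax ek hr) htk_e]
      · rw [if_neg htgt]
        set st := dirs.foldl (relaxA n dist ek er ec) (rest, vis) with hstdef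
        apply ih
        · have hle := unvis_relax_le n dist ek er ec dirs rest vis
          have hlen := popMin_length hp
          rw [← hstdef] at hle
          omega
        · -- I1 for the new state
          intro e' he'
          rcases relaxA_pq_new n dist ek er ec dirs (fun d hd => hd) (rest, vis) e' he'
            with hold | ⟨x, rfl, hstp, hin, hvis⟩
          · have hold' : e' ∈ pq := popMin_subset hp _ hold
            exact ⟨(h1 e' hold').1,
              relaxA_vis_mono n dist ek er ec dirs (rest, vis) _ ((h1 e' hold').2)⟩
          · refine ⟨?_, hvis⟩
            obtain ⟨w, hww⟩ := (h1 _ hemem).1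
            exact ⟨w ++ [x],
              walk_snoc (walk_weaken hww (kMin_le_left ek (fA dist x))) hstp hin
                (kMin_le_right ek (fA dist x))⟩
        · -- I2 for the new state
          have hvis_i : l[i] ∈ vis := (h1 _ hkmem).2
          let P : ℕ → Prop := fun j => j < l.length ∧ l.getD j ((0 : Int), (0 : Int)) ∈ st.2
          haveI : DecidablePred P := fun j => by
            unfold P
            infer_instance
          have hPi : P i := ⟨hi, by
            rw [hg i hi]
            exact relaxA_vis_mono n dist ek er ec dirs (rest, vis) _ hvis_i⟩
          have hib : i ≤ l.length - 1 := by omega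
          have hfg : P (Nat.findGreatest P (l.length - 1)) := Nat.findGreatest_spec hib hPi
          have hii' : i ≤ Nat.findGreatest P (l.length - 1) := Nat.le_findGreatest hib hPi
          set i' := Nat.findGreatest P (l.length - 1) with hi'def
          obtain ⟨hi'lt, hi'mem⟩ := hfg
          refine ⟨i', hi'lt, ?_, ?_⟩
          · by_cases hgt : i < i'
            · have hnotvis : l[i'] ∉ vis := hunv i' hgt hi'lt
              have hmem' : l[i'] ∈ st.2 := by
                rw [← hg i' hi'lt]
                exact hi'mem
              rcases relaxA_vis_new n dist ek er ec dirs (fun d hd => hd) (rest, vis) _ hmem'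
                with h | h
              · exact absurd h hnotvis
              · refine ⟨kMin ek (fA dist l[i']), h.2.2, ?_⟩
                exact le_kMin htk_e (hw.2.2.2 _ (List.getElem_mem _)).2
            · have hieq : i' = i := by omega
              have hne : (k, l[i]) ≠ ((ek, er, ec) : EK) := by
                intro heq
                have hsnd : l[i] = (er, ec) := congrArg Prod.snd heq
                have hlast : l[l.length - 1]'(by omega) = ((n - 1 : Int), (n - 1 : Int)) := by
                  have h2 := hw.2.1
                  rw [List.getLast?_eq_getElem?, List.getElem?_eq_getElem (by omega)] at h2
                  simpa using h2
                have hine : i ≠ l.length - 1 := by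
                  intro he
                  apply htgt
                  have : l[i] = ((n - 1 : Int), (n - 1 : Int)) := by
                    rw [← hlast]
                    congr 1
                  rw [hsnd] at this
                  exact ⟨(congrArg Prod.fst this), (congrArg Prod.snd this)⟩
                have hi1 : i + 1 < l.length := by omega
                obtain ⟨d, hd, heq2⟩ := (List.isChain_iff_getElem.mp hw.2.2.1) i (by omega)
                have hx1 : (l[i + 1]'hi1) = (er + d.1, ec + d.2) := by
                  rw [heq2, hsnd]
                have hinr : inRn n (er + d.1, ec + d.2) := by
                  rw [← hx1]
                  exact (hw.2.2.2 _ (List.getElem_mem _)).1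
                have hcov : (l[i + 1]'hi1) ∈ st.2 := by
                  rw [hx1, hstdef]
                  exact relaxA_coverage n dist ek er ec dirs (rest, vis) d hd hinr
                have hP1 : P (i + 1) := ⟨hi1, by rw [hg _ hi1]; exact hcov⟩
                exact Nat.findGreatest_is_greatest
                  (show i' < i + 1 by omega) (by omega) hP1
              have hrest : (k, l[i]) ∈ rest := by
                rcases popMin_cover hp _ hkmem with h | h
                · exact absurd h hne
                · exact h
              have hel : (l[i']'hi'lt) = l[i]'hi := by simp only [hieq]
              rw [hel]
              exact ⟨k, relaxA_pq_mono n dist ek er ec dirs (rest, vis) _ hrest, hkle⟩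
          · intro j hjgt hjlt hmem
            have hPj : P j := ⟨hjlt, by rw [hg _ hjlt]; exact hmem⟩
            exact Nat.findGreatest_is_greatest (by omega) (by omega) hPj

theorem main_equiv (n : Int) (dist : List (List KO)) (hn : 1 ≤ n) :
    loopA n dist [(mAt dist 0 0, 0, 0)] (PySem.Set.ofList [((0 : Int), (0 : Int))])
      = searchLoop n dist (sortDescK (valsB n dist)) := by
  obtain ⟨hsorted, hmem⟩ := sortDescK_facts (valsB n dist)
  obtain ⟨x0, hx0v, hx0c⟩ := exists_conn n dist hn
  obtain ⟨tk, htks, htkc, htkmax, heq⟩ :=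
    search_first n dist _ hsorted ⟨x0, (hmem x0).mpr hx0v, hx0c⟩
  rw [heq]
  have hconnA : connS n (fA dist) tk :=
    (connS_AB n dist tk).mpr ((connB_iff n dist tk hn).mp htkc)
  obtain ⟨l, hw⟩ := hconnA
  have hmax : ∀ k, connS n (fA dist) k → kLe k tk = true := by
    intro k hk
    obtain ⟨w, hww⟩ := (connS_AB n dist k).mp hk
    obtain ⟨hb1, hb2, ⟨q, hqin, hqe⟩⟩ := walk_bottleneck hww
    have hv : kMinList (w.map (fB dist)) ∈ valsB n dist :=
      (mem_valsB n dist _).mpr ⟨q, hqin, hqe⟩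
    have hc : connB n dist (kMinList (w.map (fB dist))) = true :=
      (connB_iff n dist _ hn).mpr ⟨w, hb2⟩
    exact kLe_trans hb1 (htkmax _ ((hmem _).mpr hv) hc)
  have hseen : PySem.Set.ofList [((0 : Int), (0 : Int))] = [((0 : Int), (0 : Int))] := rfl
  have hg0 : ∀ j (hj : j < l.length), l.getD j ((0 : Int), (0 : Int)) = l[j] :=
    fun j hj => List.getD_eq_getElem l _ hj
  have hlpos : 0 < l.length := by
    cases hl : l with
    | nil =>
      have h1 := hw.1
      rw [hl] at h1
      simp at h1
    | cons a u => simp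
  have h0 : l[0]'hlpos = ((0 : Int), (0 : Int)) := by
    have h1 := hw.1
    rw [List.head?_eq_getElem?, List.getElem?_eq_getElem hlpos] at h1
    simpa using h1
  refine dijk_main n dist tk l hw hmax _ _ _ le_rfl ?_ ?_
  · intro e he
    simp at he
    subst he
    refine ⟨⟨[(0, 0)], walk_singleton n (fA dist) (mAt dist 0 0)
      ⟨le_refl 0, by omega, le_refl 0, by omega⟩ (kLe_refl _)⟩, ?_⟩
    rw [hseen]
    simp
  · let P : ℕ → Prop := fun j => j < l.length ∧ l.getD j ((0 : Int), (0 : Int)) = ((0 : Int), (0 : Int))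
    haveI : DecidablePred P := fun j => by unfold P; infer_instance
    have hP0 : P 0 := ⟨hlpos, by rw [hg0 0 hlpos]; exact h0⟩
    have hfg : P (Nat.findGreatest P (l.length - 1)) :=
      Nat.findGreatest_spec (Nat.zero_le (l.length - 1)) hP0
    set i0 := Nat.findGreatest P (l.length - 1) with hi0def
    obtain ⟨hi0, hmem0⟩ := hfg
    have hl0 : l[i0]'hi0 = ((0 : Int), (0 : Int)) := by
      rw [← hg0 _ hi0]
      exact hmem0
    refine ⟨i0, hi0, ⟨mAt dist 0 0, ?_, ?_⟩, ?_⟩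
    · rw [hl0]
      simp
    · have hm : ((0 : Int), (0 : Int)) ∈ l := by
        rw [← hl0]
        exact List.getElem_mem _
      exact (hw.2.2.2 _ hm).2
    · intro j hjgt hjlt hmemv
      rw [hseen] at hmemv
      have hj0 : l[j] = ((0 : Int), (0 : Int)) := by simpa using hmemv
      have hPj : P j := ⟨hjlt, by rw [hg0 _ hjlt]; exact hj0⟩
      exact Nat.findGreatest_is_greatest (by omega) (by omega) hPj

-- ===== VERDICT (by name: the statement is the Claim_ definition above) =====
theorem safest_path_spec : Claim_equal_safest_path := by
  intro grid _ hpre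
  unfold Spec_safest_path safest_path safest_path_alt
  exact main_equiv _ _ (by exact_mod_cast hpre.1)
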